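-- pv_equiv track=rewrite | github.com/ALLENDE123X/ident-lab | WeakIdent-Python/archive/run_subsamples.py | compute_ranges
-- ===== SOURCE A (Python) =====
-- from typing import List, Tuple
--
-- def compute_ranges(n: int, splits: int) -> List[Tuple[int, int]]:
--     """Return inclusive index ranges that split [0, n-1] into `splits` contiguous parts."""
--     ranges = []
--     sizes = [n // splits] * splits
--     for i in range(n % splits):
--         sizes[i] += 1
--     start = 0
--     for sz in sizes:
--         end = start + sz - 1
--         ranges.append((start, end))
--         start = end + 1
--     return ranges
-- ===== SOURCE B (Python) =====
-- def compute_ranges(n: int, splits: int):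
--     """Return inclusive index ranges that split [0, n-1] into `splits` contiguous parts."""
--     q, r = divmod(n, splits)
--     ranges = []
--     for i in range(splits):
--         start = i * q + min(i, r)
--         size = q + 1 if i < r else q
--         ranges.append((start, start + size - 1))
--     return ranges
-- ===== Notes on version B (the rewrite author's own statement) =====
-- stated objective: alternative
-- what changed: Replaces the sizes list plus running-start accumulator with a single loop over range(splits) computing each range in closed form (start = i*q + min(i, r)) from q, r = divmod(n, splits).
import Mathlib
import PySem

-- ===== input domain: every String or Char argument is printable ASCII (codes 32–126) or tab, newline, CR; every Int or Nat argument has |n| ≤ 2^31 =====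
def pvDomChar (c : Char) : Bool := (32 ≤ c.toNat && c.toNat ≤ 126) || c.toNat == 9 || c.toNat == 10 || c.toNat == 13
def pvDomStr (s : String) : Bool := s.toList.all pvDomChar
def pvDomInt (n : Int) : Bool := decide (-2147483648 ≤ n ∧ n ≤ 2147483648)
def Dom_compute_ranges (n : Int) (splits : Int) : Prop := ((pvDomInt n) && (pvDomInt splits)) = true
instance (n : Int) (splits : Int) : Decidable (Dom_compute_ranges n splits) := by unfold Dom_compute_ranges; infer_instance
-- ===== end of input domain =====

-- B replaces A's sizes list + running-start accumulator with one loop computing each range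
-- in closed form from i, q = n // splits and r = n % splits (objective: alternative).

-- ===== PORT A =====
-- `[n // splits] * splits`: a non-positive repeat count yields [], exactly what `.toNat = 0` gives.
-- `sizes[i] += 1` for i in range(n % splits): i is always a valid index when splits ≠ 0
-- (0 ≤ i < n % splits < splits = len(sizes)), so the total pyGetD/pySetD forms are exact here.
def compute_ranges (n : Int) (splits : Int) : List (Int × Int) :=
  let ranges : List (Int × Int) := []
  let sizes : List Int := List.replicate splits.toNat (PySem.Int.floordiv n splits)
  let sizes := (PySem.List.pyRange 0 (PySem.Int.mod n splits) 1).foldl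
    (fun s i => PySem.List.pySetD s i (PySem.List.pyGetD s i 0 + 1)) sizes
  (sizes.foldl
    (fun (st : List (Int × Int) × Int) sz =>
      let endi := st.2 + sz - 1
      (st.1 ++ [(st.2, endi)], endi + 1)) (ranges, 0)).1

-- ===== PORT B =====
def compute_ranges_alt (n : Int) (splits : Int) : List (Int × Int) :=
  let q := PySem.Int.floordiv n splits
  let r := PySem.Int.mod n splits
  (PySem.List.pyRange 0 splits 1).foldl
    (fun ranges i =>
      let start := i * q + min i r
      let size := if i < r then q + 1 else q
      ranges ++ [(start, start + size - 1)]) []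

-- ===== PRECONDITION & SPEC =====
-- splits == 0 makes `n // splits` raise ZeroDivisionError in A (and in B); everything else returns.
def Pre_compute_ranges (n : Int) (splits : Int) : Prop := splits ≠ 0
instance (n : Int) (splits : Int) : Decidable (Pre_compute_ranges n splits) := by unfold Pre_compute_ranges; infer_instance
def pvWitness_compute_ranges : Int × Int := (10, 3)

def Spec_compute_ranges (n : Int) (splits : Int) (out : List (Int × Int)) : Prop := out = compute_ranges_alt n splits
instance (n : Int) (splits : Int) (out : List (Int × Int)) : Decidable (Spec_compute_ranges n splits out) := by unfold Spec_compute_ranges; infer_instance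

-- ===== CLAIM (what is proved, stated in full; the proofs are below) =====
def Claim_equal_compute_ranges : Prop := ∀ (n : Int) (splits : Int), Dom_compute_ranges n splits → Pre_compute_ranges n splits → Spec_compute_ranges n splits (compute_ranges n splits)

-- ===== LEMMAS AND PROOFS =====

-- pyRange with a non-positive extent is empty
theorem pyRange_nonpos (b : Int) (h : b ≤ 0) : PySem.List.pyRange 0 b 1 = [] := by
  simp [PySem.List.pyRange, show ¬(0:Int) < b by omega]

-- the (start, end) pairs A's second loop produces, as a recursive function of the sizes list
def goRanges : List Int → Int → List (Int × Int)
  | [], _ => []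
  | sz :: t, s => (s, s + sz - 1) :: goRanges t (s + sz)

theorem foldA (sizes : List Int) (acc : List (Int × Int)) (s : Int) :
    (sizes.foldl
      (fun (st : List (Int × Int) × Int) sz =>
        (st.1 ++ [(st.2, st.2 + sz - 1)], st.2 + sz - 1 + 1)) (acc, s)).1
      = acc ++ goRanges sizes s := by
  induction sizes generalizing acc s with
  | nil => simp [goRanges]
  | cons sz t ih =>
    simp only [List.foldl_cons, goRanges, ih]
    simp [show s + sz - 1 + 1 = s + sz by omega]

-- incrementing index k of the map-formula list bumps the threshold from k to k+1
theorem set_map_range (q : Int) (m k : Nat) :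
    ((List.range m).map (fun j : Nat => if (j:Int) < (k:Int) then q + 1 else q)).set k (q + 1)
      = (List.range m).map (fun j : Nat => if (j:Int) < (k:Int) + 1 then q + 1 else q) := by
  apply List.ext_getElem
  · simp
  · intro i h1 h2
    simp only [List.getElem_set, List.getElem_map, List.getElem_range] at *
    by_cases hik : i = k
    · simp [hik]
    · have : ((i:Int) < (k:Int)) ↔ ((i:Int) < (k:Int) + 1) := by
        constructor <;> intro <;> omega
      simp [this]
      omega

-- A's first loop turns the replicate list into the closed-form sizes list
theorem sizesA_eq (q : Int) (m k : Nat) (hk : k ≤ m) :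
    (PySem.List.pyRange 0 (k : Int) 1).foldl
      (fun s i => PySem.List.pySetD s i (PySem.List.pyGetD s i 0 + 1))
      (List.replicate m q)
      = (List.range m).map (fun j : Nat => if (j:Int) < (k:Int) then q + 1 else q) := by
  induction k with
  | zero =>
    rw [show ((0:Nat):Int) = 0 by norm_num, pyRange_nonpos 0 le_rfl]
    simp
    apply List.ext_getElem <;> simp
  | succ k ih =>
    have hk' : k ≤ m := by omega
    rw [show ((k+1:Nat):Int) = (k:Int) + 1 by push_cast; ring,
        PySem.List.pyRange_one_succ_right (by positivity), List.foldl_append, ih hk']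
    simp only [List.foldl_cons, List.foldl_nil]
    have hget : PySem.List.pyGetD
        ((List.range m).map (fun j : Nat => if (j:Int) < (k:Int) then q + 1 else q)) (k:Int) 0
        = q := by
      rw [PySem.List.pyGetD_natCast]
      rw [PySem.List.getD_map_range _ m k _ (by omega)]
      simp
    rw [hget, PySem.List.pySetD_natCast, set_map_range q m k]

-- the scan over the closed-form sizes list is the closed-form map, shifted to start j
theorem go_range' (q r : Int) (t j : Nat) :
    goRanges ((List.range' j t).map (fun u : Nat => if (u:Int) < r then q + 1 else q))
      ((j:Int) * q + min (j:Int) r)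
      = (List.range' j t).map (fun u : Nat =>
          ((u:Int) * q + min (u:Int) r,
           (u:Int) * q + min (u:Int) r + (if (u:Int) < r then q + 1 else q) - 1)) := by
  induction t generalizing j with
  | zero => simp [goRanges]
  | succ t ih =>
    rw [List.range'_succ]
    simp only [List.map_cons, goRanges, List.map_cons]
    have hstep : (j:Int) * q + min (j:Int) r + (if (j:Int) < r then q + 1 else q)
        = ((j+1:Nat):Int) * q + min ((j+1:Nat):Int) r := by
      push_cast
      by_cases h : (j:Int) < r
      · rw [if_pos h, min_eq_left (by omega), min_eq_left (by omega)]; ring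
      · rw [if_neg h, min_eq_right (by omega), min_eq_right (by omega)]; ring
    rw [hstep, ih (j+1)]

theorem compute_ranges_eq_alt (n splits : Int) (hs : splits ≠ 0) :
    compute_ranges n splits = compute_ranges_alt n splits := by
  by_cases hpos : 0 < splits
  · -- positive splits
    set q := PySem.Int.floordiv n splits with hq
    set r := PySem.Int.mod n splits with hrdef
    have hr0 : 0 ≤ r := PySem.Int.mod_nonneg n hpos
    have hrs : r < splits := PySem.Int.mod_lt n hpos
    set m := splits.toNat with hm
    have hms : (m:Int) = splits := Int.toNat_of_nonneg (by omega)
    have hrk : ((r.toNat : Nat) : Int) = r := Int.toNat_of_nonneg hr0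
    -- B side
    have hB : compute_ranges_alt n splits
        = (List.range m).map (fun u : Nat =>
            ((u:Int) * q + min (u:Int) r,
             (u:Int) * q + min (u:Int) r + (if (u:Int) < r then q + 1 else q) - 1)) := by
      unfold compute_ranges_alt
      rw [← hq, ← hrdef, ← hms, PySem.List.pyRange_zero_natCast,
          PySem.List.foldl_append_singleton_eq_map
            (fun i : Int => (i * q + min i r, i * q + min i r + (if i < r then q + 1 else q) - 1))]
      simp [List.map_map, Function.comp]
    -- A side
    have hA : compute_ranges n splits
        = goRanges ((List.range m).map (fun j : Nat => if (j:Int) < r then q + 1 else q)) 0 := by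
      simp only [compute_ranges]
      rw [← hq, ← hrdef, ← hm, ← hrk, sizesA_eq q m r.toNat (by omega), foldA]
      rw [hrk]
      simp
    rw [hA, hB, List.range_eq_range']
    have h0 : (0:Int) = ((0:Nat):Int) * q + min ((0:Nat):Int) r := by
      simp [min_eq_left hr0]
    rw [h0, go_range' q r m 0]
  · -- negative splits: both programs produce []
    have hneg : splits < 0 := by omega
    have hA : compute_ranges n splits = [] := by
      unfold compute_ranges
      rw [pyRange_nonpos _ (PySem.Int.mod_neg_bounds n hneg).2,
          show splits.toNat = 0 from Int.toNat_of_nonpos (by omega)]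
      simp
    have hB : compute_ranges_alt n splits = [] := by
      unfold compute_ranges_alt
      rw [pyRange_nonpos _ (by omega)]
      simp
    rw [hA, hB]

-- ===== VERDICT (by name: the statement is the Claim_ definition above) =====
theorem compute_ranges_spec : Claim_equal_compute_ranges := by
  intro n splits _ hpre
  unfold Spec_compute_ranges
  exact compute_ranges_eq_alt n splits hpre
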